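-- pv_equiv track=rewrite | github.com/zero-bacteria/- | 4865_글자수/sol1.py | str_count
-- ===== SOURCE A (Python) =====
-- def str_count(str1, str2):
--     str_list = list(set(str1))
--     count_dict = {}
--     for ch in str_list:
--         count_dict[ch] = 0
--         for s in str2:
--             if ch == s:
--                 count_dict[ch] += 1
--
--     max_value = 0
--     for ch in str_list:
--         if count_dict.get(ch) > max_value:
--             max_value = count_dict.get(ch)
--
--     return max_value
-- ===== SOURCE B (Python) =====
-- def str_count(str1, str2):
--     set1 = set(str1)
--     best = 0
--     run = 0
--     prev = None
--     for c in sorted(str2):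
--         if c == prev:
--             run += 1
--         else:
--             prev = c
--             run = 1
--         if c in set1 and run > best:
--             best = run
--     return best
-- ===== Notes on version B (the rewrite author's own statement) =====
-- stated objective: faster
-- what changed: Instead of rescanning str2 once per distinct character of str1 and then a second max loop over a dict, B sorts str2 once and makes a single run-length pass over the sorted characters, taking the longest run whose character occurs in set(str1); no dict is built at all.
import Mathlib
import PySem

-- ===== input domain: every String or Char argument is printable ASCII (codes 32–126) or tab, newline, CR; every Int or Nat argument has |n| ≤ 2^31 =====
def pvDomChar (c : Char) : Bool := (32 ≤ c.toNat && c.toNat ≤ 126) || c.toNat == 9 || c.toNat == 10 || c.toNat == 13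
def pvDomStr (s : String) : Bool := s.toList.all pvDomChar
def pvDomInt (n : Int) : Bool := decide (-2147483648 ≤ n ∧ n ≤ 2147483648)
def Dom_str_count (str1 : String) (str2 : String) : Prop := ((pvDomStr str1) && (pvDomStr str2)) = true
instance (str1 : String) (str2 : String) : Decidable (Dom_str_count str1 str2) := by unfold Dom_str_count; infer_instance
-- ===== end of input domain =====

-- B replaces A's per-distinct-character rescans of str2 (plus a second max loop over a dict)
-- by one sort of str2 and a single run-length pass over the sorted characters, keeping the
-- longest run whose character lies in set(str1); no dict is built.

-- ===== PORT A =====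
-- list(set(str1)) iterates in CPython hash order, which PySem.Set does not model; the result is
-- consumed only through order-independent accumulation (per-key counts, overall max), so the
-- first-occurrence order used here is exact. count_dict.get(ch) is always a hit (every ch of
-- str_list was inserted), so it is ported as getD ch 0.
def str_count (str1 : String) (str2 : String) : Int :=
  let strList : List Char := PySem.Set.ofList str1.toList
  let countDict : PySem.Dict Char Int :=
    strList.foldl (fun d ch =>
      str2.toList.foldl (fun d s =>
        if ch == s then d.insert ch (d.getD ch 0 + 1) else d) (d.insert ch 0))
      PySem.Dict.empty
  strList.foldl (fun maxValue ch =>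
    if countDict.getD ch 0 > maxValue then countDict.getD ch 0 else maxValue) 0

-- ===== PORT B =====
-- the body of Source B's for-loop over sorted(str2): state is (best, run, prev)
def bstep (set1 : PySem.Set Char) (st : Int × Int × Option Char) (c : Char) :
    Int × Int × Option Char :=
  let best := st.1
  let rp := if some c == st.2.2 then (st.2.1 + 1, st.2.2) else ((1 : Int), some c)
  if set1.contains c && decide (rp.1 > best) then (rp.1, rp.1, rp.2) else (best, rp.1, rp.2)

def str_count_alt (str1 : String) (str2 : String) : Int :=
  let set1 : PySem.Set Char := PySem.Set.ofList str1.toList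
  ((PySem.List.sorted str2.toList (fun c => c) false).foldl (bstep set1)
    (0, 0, none)).1

-- ===== PRECONDITION & SPEC =====
def Spec_str_count (str1 : String) (str2 : String) (out : Int) : Prop := out = str_count_alt str1 str2
instance (str1 : String) (str2 : String) (out : Int) : Decidable (Spec_str_count str1 str2 out) := by unfold Spec_str_count; infer_instance

-- ===== CLAIM (what is proved, stated in full; the proofs are below) =====
def Claim_equal_str_count : Prop := ∀ (str1 : String) (str2 : String), Dom_str_count str1 str2 → Spec_str_count str1 str2 (str_count str1 str2)

-- ===== LEMMAS AND PROOFS =====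

-- running max of f over a list, from a base value
def mf (f : Char → Int) (l : List Char) (b : Int) : Int :=
  l.foldl (fun mv k => max mv (f k)) b

lemma mf_cons (f : Char → Int) (c : Char) (l : List Char) (b : Int) :
    mf f (c :: l) b = mf f l (max b (f c)) := rfl

lemma mf_max (f : Char → Int) (l : List Char) (b x : Int) :
    mf f l (max b x) = max (mf f l b) x := by
  induction l generalizing b with
  | nil => rfl
  | cons c t ih => rw [mf_cons, mf_cons, max_right_comm, ih]

lemma le_mf_init (f : Char → Int) (l : List Char) (b : Int) : b ≤ mf f l b := by
  induction l generalizing b with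
  | nil => exact le_rfl
  | cons c t ih => exact le_trans (le_max_left _ _) (ih _)

lemma le_mf_mem (f : Char → Int) (l : List Char) (b : Int) (k : Char) (hk : k ∈ l) :
    f k ≤ mf f l b := by
  induction l generalizing b with
  | nil => simp at hk
  | cons c t ih =>
    rcases List.mem_cons.mp hk with h | h
    · subst h; exact le_trans (le_max_right _ _) (le_mf_init f t _)
    · exact ih _ h


lemma mf_absorb (f : Char → Int) (l : List Char) (b x : Int) (k : Char) (hk : k ∈ l)
    (hx : x ≤ f k) : mf f l (max b x) = mf f l b := by
  rw [mf_max]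
  exact max_eq_left (le_trans hx (le_mf_mem f l b k hk))

lemma mf_congr (f g : Char → Int) (l : List Char) (b : Int) (h : ∀ k ∈ l, f k = g k) :
    mf f l b = mf g l b := by
  unfold mf
  apply PySem.List.foldl_congr_mem
  intro acc x hx
  rw [h x hx]

lemma mf_perm (f : Char → Int) (l l' : List Char) (hp : l.Perm l') (b : Int) :
    mf f l b = mf f l' b :=
  @List.Perm.foldl_eq _ _ _ _ _
    ⟨fun b a1 a2 => max_right_comm b (f a1) (f a2)⟩ hp b

-- one step of the pass, with the Bool tests replaced by Prop ifs
lemma bstep_cont (set1 : PySem.Set Char) (b r : Int) (c : Char) :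
    bstep set1 (b, r, some c) c = ((if c ∈ set1 then max b (r + 1) else b), r + 1, some c) := by
  by_cases hc : c ∈ set1
  · by_cases hgt : b < r + 1
    · have hm : max b (r + 1) = r + 1 := max_eq_right (le_of_lt hgt)
      simp [bstep, hc, hgt, hm]
    · have hm : max b (r + 1) = b := max_eq_left (le_of_not_gt hgt)
      simp [bstep, hc, hgt, hm]
  · simp [bstep, hc]

lemma bstep_new (set1 : PySem.Set Char) (b r : Int) (p : Option Char) (c : Char)
    (hne : (some c == p) = false) (hb : 0 ≤ b) :
    bstep set1 (b, r, p) c = ((if c ∈ set1 then max b 1 else b), 1, some c) := by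
  by_cases hc : c ∈ set1
  · by_cases hgt : b < 1
    · have hb0 : b = 0 := by omega
      simp [bstep, hne, hc, hb0]
    · have hm : max b 1 = b := max_eq_left (le_of_not_gt hgt)
      simp [bstep, hne, hc, hgt, hm]
  · simp [bstep, hne, hc]

-- the run-length pass over a sorted suffix, from an arbitrary state (b, r, some p):
-- best ends up as the running max of the (run-extended) counts over the distinct set1-chars
lemma bstep_run (set1 : PySem.Set Char) (l : List Char) (p : Char) (r b : Int)
    (hs : l.Pairwise (· ≤ ·)) (hp : ∀ c ∈ l, p ≤ c) (hb : 0 ≤ b)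
    (hrb : p ∈ set1 → r ≤ b) :
    (l.foldl (bstep set1) (b, r, some p)).1
      = mf (fun k => (if k = p then r else 0) + (l.count k : Int))
           (l.dedup.filter (fun k => set1.contains k)) b := by
  induction l generalizing p r b with
  | nil => rfl
  | cons c t ih =>
    rcases List.pairwise_cons.mp hs with ⟨hct, hst⟩
    rw [List.foldl_cons]
    by_cases hcp : c = p
    · -- run continues
      subst hcp
      rw [bstep_cont set1 b r c]
      have hb' : (0:Int) ≤ if c ∈ set1 then max b (r + 1) else b := by
        split
        · exact le_trans hb (le_max_left _ _)
        · exact hb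
      have hrb' : c ∈ set1 → r + 1 ≤ if c ∈ set1 then max b (r + 1) else b := by
        intro hc; rw [if_pos hc]; exact le_max_right _ _
      rw [ih c (r + 1) _ hst hct hb' hrb']
      have hcongr : ∀ k ∈ t.dedup.filter (fun k => set1.contains k),
          (if k = c then r + 1 else 0) + (t.count k : Int)
            = (if k = c then r else 0) + ((c :: t).count k : Int) := by
        intro k _
        by_cases hk : k = c
        · subst hk; rw [if_pos rfl, if_pos rfl, List.count_cons_self]; push_cast; ring
        · simp [hk, Ne.symm hk]
      by_cases hct' : c ∈ t
      · rw [List.dedup_cons_of_mem hct', mf_congr _ _ _ _ hcongr]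
        by_cases hc : c ∈ set1
        · rw [if_pos hc]
          have hkin : c ∈ t.dedup.filter (fun k => set1.contains k) :=
            List.mem_filter.mpr ⟨List.mem_dedup.mpr hct',
              (PySem.Set.contains_iff _ _).mpr hc⟩
          have hle : r + 1 ≤ (if c = c then r else 0) + ((c :: t).count c : Int) := by
            rw [if_pos rfl, List.count_cons_self]
            have : 1 ≤ t.count c := List.count_pos_iff.mpr hct'
            push_cast
            omega
          exact mf_absorb _ _ b (r + 1) c hkin hle
        · rw [if_neg hc]
      · rw [List.dedup_cons_of_notMem hct', List.filter_cons]
        by_cases hc : c ∈ set1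
        · rw [if_pos hc, if_pos ((PySem.Set.contains_iff _ _).mpr hc), mf_cons]
          have hv : (if c = c then r else 0) + ((c :: t).count c : Int) = r + 1 := by
            rw [if_pos rfl, List.count_cons_self, List.count_eq_zero_of_not_mem hct']
            push_cast; ring
          rw [hv, mf_congr _ _ _ _ hcongr]
        · rw [if_neg hc, if_neg (by simpa [PySem.Set.contains_iff] using hc),
            mf_congr _ _ _ _ hcongr]
    · -- new run starts at c
      have hpnot : p ∉ c :: t := by
        intro hmem
        rcases List.mem_cons.mp hmem with h | h
        · exact hcp h.symm
        · exact hcp (le_antisymm (hct p h) (hp c (List.mem_cons_self ..)))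
      rw [bstep_new set1 b r (some p) c (by simp [hcp]) hb]
      have hb' : (0:Int) ≤ if c ∈ set1 then max b 1 else b := by
        split
        · exact le_trans hb (le_max_left _ _)
        · exact hb
      have hrb' : c ∈ set1 → (1:Int) ≤ if c ∈ set1 then max b 1 else b := by
        intro hc; rw [if_pos hc]; exact le_max_right _ _
      rw [ih c 1 _ hst hct hb' hrb']
      have hcongr : ∀ k ∈ t.dedup.filter (fun k => set1.contains k),
          (if k = c then 1 else 0) + (t.count k : Int)
            = (if k = p then r else 0) + ((c :: t).count k : Int) := by
        intro k hk
        have hkp : k ≠ p := by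
          intro h; subst h
          exact hpnot (List.mem_cons_of_mem c
            (List.mem_dedup.mp (List.mem_filter.mp hk).1))
        rw [if_neg hkp]
        by_cases hkc : k = c
        · subst hkc; rw [if_pos rfl, List.count_cons_self]; push_cast; ring
        · simp [hkc, Ne.symm hkc]
      by_cases hct' : c ∈ t
      · rw [List.dedup_cons_of_mem hct', mf_congr _ _ _ _ hcongr]
        by_cases hc : c ∈ set1
        · rw [if_pos hc]
          have hkin : c ∈ t.dedup.filter (fun k => set1.contains k) :=
            List.mem_filter.mpr ⟨List.mem_dedup.mpr hct',
              (PySem.Set.contains_iff _ _).mpr hc⟩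
          have hle : (1:Int) ≤ (if c = p then r else 0) + ((c :: t).count c : Int) := by
            rw [if_neg hcp, List.count_cons_self]
            have : 1 ≤ t.count c := List.count_pos_iff.mpr hct'
            push_cast; omega
          exact mf_absorb _ _ b 1 c hkin hle
        · rw [if_neg hc]
      · rw [List.dedup_cons_of_notMem hct', List.filter_cons]
        by_cases hc : c ∈ set1
        · rw [if_pos hc, if_pos ((PySem.Set.contains_iff _ _).mpr hc), mf_cons]
          have hv : (if c = p then r else 0) + ((c :: t).count c : Int) = 1 := by
            rw [if_neg hcp, List.count_cons_self, List.count_eq_zero_of_not_mem hct']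
            norm_num
          rw [hv, mf_congr _ _ _ _ hcongr]
        · rw [if_neg hc, if_neg (by simpa [PySem.Set.contains_iff] using hc),
            mf_congr _ _ _ _ hcongr]

-- the whole pass from the initial state (0, 0, None)
lemma bfold_eq (set1 : PySem.Set Char) (l : List Char) (hs : l.Pairwise (· ≤ ·)) :
    (l.foldl (bstep set1) (0, 0, none)).1
      = mf (fun k => (l.count k : Int)) (l.dedup.filter (fun k => set1.contains k)) 0 := by
  cases l with
  | nil => rfl
  | cons c t =>
    rcases List.pairwise_cons.mp hs with ⟨hct, hst⟩
    rw [List.foldl_cons, bstep_new set1 0 0 none c (by simp) le_rfl]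
    have hb' : (0:Int) ≤ if c ∈ set1 then max 0 1 else 0 := by
      split
      · exact le_max_left _ _
      · exact le_rfl
    have hrb' : c ∈ set1 → (1:Int) ≤ if c ∈ set1 then max 0 1 else 0 := by
      intro hc; rw [if_pos hc]; exact le_max_right _ _
    rw [bstep_run set1 t c 1 _ hst hct hb' hrb']
    have hcongr : ∀ k ∈ t.dedup.filter (fun k => set1.contains k),
        (if k = c then 1 else 0) + (t.count k : Int) = ((c :: t).count k : Int) := by
      intro k _
      by_cases hkc : k = c
      · subst hkc; rw [if_pos rfl, List.count_cons_self]; push_cast; ring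
      · simp [hkc, Ne.symm hkc]
    by_cases hct' : c ∈ t
    · rw [List.dedup_cons_of_mem hct', mf_congr _ _ _ _ hcongr]
      by_cases hc : c ∈ set1
      · rw [if_pos hc]
        have hkin : c ∈ t.dedup.filter (fun k => set1.contains k) :=
          List.mem_filter.mpr ⟨List.mem_dedup.mpr hct',
            (PySem.Set.contains_iff _ _).mpr hc⟩
        have hle : (1:Int) ≤ ((c :: t).count c : Int) := by
          rw [List.count_cons_self]; push_cast; omega
        exact mf_absorb _ _ 0 1 c hkin hle
      · rw [if_neg hc]
    · rw [List.dedup_cons_of_notMem hct', List.filter_cons]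
      by_cases hc : c ∈ set1
      · rw [if_pos hc, if_pos ((PySem.Set.contains_iff _ _).mpr hc), mf_cons]
        have hv : ((c :: t).count c : Int) = 1 := by
          rw [List.count_cons_self, List.count_eq_zero_of_not_mem hct']
          norm_num
        rw [hv, mf_congr _ _ _ _ hcongr]
      · rw [if_neg hc, if_neg (by simpa [PySem.Set.contains_iff] using hc),
          mf_congr _ _ _ _ hcongr]

-- ===== A-side lemmas =====

-- A's inner loop over str2, for a fixed ch: bumps ch's entry once per matching character.
lemma inner_getD_self (l : List Char) (ch : Char) (d : PySem.Dict Char Int) :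
    (l.foldl (fun d s => if ch == s then d.insert ch (d.getD ch 0 + 1) else d) d).getD ch 0
      = d.getD ch 0 + (l.count ch : Int) := by
  induction l generalizing d with
  | nil => simp
  | cons s t ih =>
    rw [List.foldl_cons]
    by_cases h : ch = s
    · subst h
      rw [if_pos (by simp), ih, PySem.Dict.getD_insert, if_pos rfl, List.count_cons_self]
      push_cast
      ring
    · rw [if_neg (by simp [h]), ih]
      simp [Ne.symm h]

lemma inner_getD_ne (l : List Char) (ch k : Char) (hk : k ≠ ch) (d : PySem.Dict Char Int) :
    (l.foldl (fun d s => if ch == s then d.insert ch (d.getD ch 0 + 1) else d) d).getD k 0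
      = d.getD k 0 := by
  induction l generalizing d with
  | nil => simp
  | cons s t ih =>
    rw [List.foldl_cons]
    by_cases h : ch = s
    · subst h
      rw [if_pos (by simp), ih, PySem.Dict.getD_insert, if_neg hk]
    · rw [if_neg (by simp [h])]
      exact ih d

-- A's outer loop: after processing a duplicate-free list of characters, each processed ch
-- holds exactly its count in str2; unprocessed keys are untouched.
lemma outer_getD (str2 : String) (l : List Char) (hnd : l.Nodup) (d : PySem.Dict Char Int) (k : Char) :
    (l.foldl (fun d ch =>
        str2.toList.foldl (fun d s =>
          if ch == s then d.insert ch (d.getD ch 0 + 1) else d) (d.insert ch 0)) d).getD k 0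
      = if k ∈ l then (str2.toList.count k : Int) else d.getD k 0 := by
  induction l generalizing d with
  | nil => simp
  | cons ch t ih =>
    rcases List.nodup_cons.mp hnd with ⟨hch, hndt⟩
    rw [List.foldl_cons, ih hndt]
    by_cases hkt : k ∈ t
    · simp [hkt]
    · by_cases hk : k = ch
      · subst hk
        rw [if_neg hkt, inner_getD_self, PySem.Dict.getD_insert, if_pos rfl,
          if_pos (List.mem_cons_self ..)]
        ring
      · rw [if_neg hkt, inner_getD_ne _ _ _ hk, PySem.Dict.getD_insert, if_neg hk]
        simp [hk, hkt]

-- a max-accumulating fold over nonnegative values ignores elements whose value is 0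
lemma mf_filter_pos (f : Char → Int) (hf : ∀ k, 0 ≤ f k) (l : List Char) (a : Int) (ha : 0 ≤ a) :
    mf f l a = mf f (l.filter (fun k => decide (0 < f k))) a := by
  induction l generalizing a with
  | nil => rfl
  | cons x t ih =>
    by_cases h : 0 < f x
    · simp only [mf_cons, List.filter_cons, h, decide_true, if_true]
      exact ih _ (le_trans ha (le_max_left _ _))
    · have hfx : f x = 0 := le_antisymm (not_lt.mp h) (hf x)
      simp only [mf_cons, List.filter_cons, hfx]
      rw [max_eq_left ha]
      exact ih _ ha

-- "if v > mv then v else mv" is "max mv v"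
lemma if_gt_eq_max (mv v : Int) : (if v > mv then v else mv) = max mv v := by
  by_cases h : mv < v
  · simp [h, max_eq_right h.le]
  · simp [h, max_eq_left (not_lt.mp h)]

theorem str_count_spec : Claim_equal_str_count := by
  intro str1 str2 _
  unfold Spec_str_count
  set cnt : Char → Int := fun k => (str2.toList.count k : Int) with hcntdef
  have hcnt_nonneg : ∀ k : Char, (0 : Int) ≤ cnt k := fun k => Int.natCast_nonneg _
  -- A's side: the dict holds exact counts; the final loop is a running max over set(str1)
  have hA : str_count str1 str2 = mf cnt (PySem.Set.ofList str1.toList) 0 := by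
    unfold str_count mf
    apply PySem.List.foldl_congr_mem
    intro acc x hx
    rw [outer_getD str2 _ (PySem.Set.nodup_ofList _) PySem.Dict.empty x, if_pos hx,
      if_gt_eq_max]
  -- B's side: the run-length pass over sorted(str2) is a running max of the counts over
  -- the distinct characters of str2 that lie in set(str1)
  set l : List Char := PySem.List.sorted str2.toList (fun c => c) false with hldef
  have hperm2 : l.Perm str2.toList := PySem.List.sorted_perm ..
  have hB : str_count_alt str1 str2
      = mf cnt (l.dedup.filter (fun k => (PySem.Set.ofList str1.toList).contains k)) 0 := by
    unfold str_count_alt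
    rw [← hldef, bfold_eq _ _ (PySem.List.sorted_pairwise ..)]
    apply mf_congr
    intro k _
    rw [hcntdef]
    exact congrArg _ (hperm2.count_eq k)
  rw [hA, hB, mf_filter_pos cnt hcnt_nonneg _ 0 le_rfl]
  apply mf_perm
  rw [List.perm_ext_iff_of_nodup ((PySem.Set.nodup_ofList _).filter _)
    (List.Nodup.filter _ (List.nodup_dedup _))]
  intro a
  simp only [List.mem_filter, PySem.Set.mem_ofList, PySem.Set.contains_iff,
    List.mem_dedup, decide_eq_true_eq, hcntdef]
  constructor
  · rintro ⟨h1, h2⟩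
    refine ⟨(hperm2.mem_iff).mpr (List.count_pos_iff.mp (by exact_mod_cast h2)), h1⟩
  · rintro ⟨h2, h1⟩
    refine ⟨h1, by exact_mod_cast List.count_pos_iff.mpr ((hperm2.mem_iff).mp h2)⟩
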